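-- pv_equiv track=rewrite | github.com/mdelia17/clique-tf-idf | clustering.py | clusteringLabelsList
-- ===== SOURCE A (Python) =====
-- def clusteringLabelsList(labels, vertex_set):
--     label_dict = {}
--     for i in range(len(vertex_set)):
--         if labels[i] not in label_dict:
--             label_dict[labels[i]] = [vertex_set[i]]
--         else:
--             label_dict[labels[i]].append(vertex_set[i])
--     return list(label_dict.values())
-- ===== SOURCE B (Python) =====
-- def clusteringLabelsList(labels, vertex_set):
--     n = len(vertex_set)
--     seen = set()
--     distinct = []
--     for i in range(n):
--         l = labels[i]
--         if l not in seen: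
--             seen.add(l)
--             distinct.append(l)
--     return [[vertex_set[i] for i in range(n) if labels[i] == lab] for lab in distinct]
-- ===== Notes on version B (the rewrite author's own statement) =====
-- stated objective: alternative
-- what changed: Replaces the single dict-of-growing-lists pass with two phases: first collect the distinct labels in first-appearance order with a seen-set, then build each group by a per-label rescan of the indices.
import Mathlib
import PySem

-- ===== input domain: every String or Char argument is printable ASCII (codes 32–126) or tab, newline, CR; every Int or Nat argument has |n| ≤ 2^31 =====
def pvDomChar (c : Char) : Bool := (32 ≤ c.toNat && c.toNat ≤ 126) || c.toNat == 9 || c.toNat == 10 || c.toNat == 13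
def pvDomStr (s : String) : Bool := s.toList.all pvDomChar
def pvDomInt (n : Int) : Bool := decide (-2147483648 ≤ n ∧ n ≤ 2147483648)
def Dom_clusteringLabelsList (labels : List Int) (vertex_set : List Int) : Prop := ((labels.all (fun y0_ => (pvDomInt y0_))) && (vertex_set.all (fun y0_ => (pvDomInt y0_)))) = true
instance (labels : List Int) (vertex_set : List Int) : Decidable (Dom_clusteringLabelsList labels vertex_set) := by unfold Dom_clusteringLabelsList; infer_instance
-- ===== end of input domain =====

-- B groups the vertices by label in two phases (distinct labels first, then one rescan
-- per label) instead of A's single pass maintaining a dict of growing lists; same result,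
-- not claimed faster.

-- ===== PORT A =====
-- one dict pass: label_dict[labels[i]] gets vertex_set[i] appended (new key -> fresh [v]).
-- pyGetD with default 0 is only exact where the index is in range; Pre_ guarantees that.
def clusteringLabelsList (labels : List Int) (vertex_set : List Int) : List (List Int) :=
  let label_dict :=
    (PySem.List.pyRange 0 (vertex_set.length : Int) 1).foldl
      (fun d i =>
        let l := PySem.List.pyGetD labels i 0
        let v := PySem.List.pyGetD vertex_set i 0
        if d.contains l = false then d.insert l [v]
        else d.insert l (d.getD l [] ++ [v]))
      PySem.Dict.empty
  label_dict.values

-- ===== PORT B =====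
-- phase 1: distinct labels in first-appearance order via a seen-set;
-- phase 2: for each distinct label, rescan the indices collecting matching vertices.
def clusteringLabelsList_alt (labels : List Int) (vertex_set : List Int) : List (List Int) :=
  let n : Int := (vertex_set.length : Int)
  let p :=
    (PySem.List.pyRange 0 n 1).foldl
      (fun (p : PySem.Set Int × List Int) i =>
        let l := PySem.List.pyGetD labels i 0
        if PySem.Set.contains p.1 l then p
        else (PySem.Set.add p.1 l, p.2 ++ [l]))
      (PySem.Set.empty, [])
  p.2.map (fun lab =>
    (PySem.List.pyRange 0 n 1).foldl
      (fun acc i =>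
        if PySem.List.pyGetD labels i 0 == lab then acc ++ [PySem.List.pyGetD vertex_set i 0]
        else acc)
      [])

-- ===== PRECONDITION & SPEC =====
-- Pre_: labels must cover every index of vertex_set; otherwise Python raises IndexError
-- at labels[i].
def Pre_clusteringLabelsList (labels : List Int) (vertex_set : List Int) : Prop :=
  vertex_set.length ≤ labels.length
instance (labels : List Int) (vertex_set : List Int) : Decidable (Pre_clusteringLabelsList labels vertex_set) := by unfold Pre_clusteringLabelsList; infer_instance
def pvWitness_clusteringLabelsList : List Int × List Int := ([1, 2, 1], [10, 20, 30])

def Spec_clusteringLabelsList (labels : List Int) (vertex_set : List Int) (out : List (List Int)) : Prop := out = clusteringLabelsList_alt labels vertex_set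
instance (labels : List Int) (vertex_set : List Int) (out : List (List Int)) : Decidable (Spec_clusteringLabelsList labels vertex_set out) := by unfold Spec_clusteringLabelsList; infer_instance

-- ===== CLAIM (what is proved, stated in full; the proofs are below) =====
def Claim_equal_clusteringLabelsList : Prop := ∀ (labels : List Int) (vertex_set : List Int), Dom_clusteringLabelsList labels vertex_set → Pre_clusteringLabelsList labels vertex_set → Spec_clusteringLabelsList labels vertex_set (clusteringLabelsList labels vertex_set)

-- ===== LEMMAS AND PROOFS =====

-- A's if/else step IS a dict 'modify': when the key is fresh, getD is [].
theorem pvA_step_eq_modify (d : PySem.Dict Int (List Int)) (l v : Int) :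
    (if d.contains l = false then d.insert l [v] else d.insert l (d.getD l [] ++ [v]))
      = d.modify l [] (· ++ [v]) := by
  by_cases h : d.contains l = false
  · rw [if_pos h]
    have hg : d.getD l [] = [] := by
      simp [PySem.Dict.getD_of_not_contains, h]
    show d.insert l [v] = d.insert l (d.getD l [] ++ [v])
    rw [hg]; rfl
  · rw [if_neg h]; rfl

-- B's phase-1 fold keeps its two accumulators equal (seen = distinct, as lists).
theorem pvB_pair_fold (xs : List Int) (s : PySem.Set Int) :
    xs.foldl
      (fun (p : PySem.Set Int × List Int) l =>
        if PySem.Set.contains p.1 l then p else (PySem.Set.add p.1 l, p.2 ++ [l]))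
      (s, s)
      = (xs.foldl PySem.Set.add s, xs.foldl PySem.Set.add s) := by
  induction xs generalizing s with
  | nil => rfl
  | cons x t ih =>
    simp only [List.foldl_cons]
    by_cases h : s.contains x = true
    · have hadd : PySem.Set.add s x = s := by
        show (if s.contains x then s else s ++ [x]) = s
        rw [if_pos h]
      rw [if_pos h, hadd, ih]
    · have hadd : PySem.Set.add s x = s ++ [x] := by
        show (if s.contains x then s else s ++ [x]) = s ++ [x]
        rw [if_neg h]
      rw [if_neg h, hadd, ih]

theorem clusteringLabelsList_eq_alt (labels vertex_set : List Int) :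
    clusteringLabelsList labels vertex_set = clusteringLabelsList_alt labels vertex_set := by
  unfold clusteringLabelsList clusteringLabelsList_alt
  simp only []
  set R := PySem.List.pyRange 0 (vertex_set.length : Int) 1 with hR
  set L : Int → Int := fun i => PySem.List.pyGetD labels i 0 with hL
  set V : Int → Int := fun i => PySem.List.pyGetD vertex_set i 0 with hV
  -- A's dict as a fold of modifies over the index range
  have hdict :
      R.foldl
        (fun d i =>
          if d.contains (L i) = false then d.insert (L i) [V i]
          else d.insert (L i) (d.getD (L i) [] ++ [V i]))
        PySem.Dict.empty
        = R.foldl (fun d i => d.modify (L i) [] (· ++ [V i])) PySem.Dict.empty := by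
    apply PySem.List.foldl_congr_mem
    intro d i _
    exact pvA_step_eq_modify d (L i) (V i)
  rw [hdict]
  set D := R.foldl (fun d i => d.modify (L i) [] (· ++ [V i])) PySem.Dict.empty with hD
  -- keys of the dict: distinct labels in first-appearance order
  have hnodup : D.keys.Nodup := by
    rw [hD]
    exact PySem.Dict.nodup_keys_foldl_modify_key R L [] (fun d i => (· ++ [V i]))
      PySem.Dict.empty (by simp)
  have hkeys : D.keys = PySem.Set.ofList (R.map L) := by
    rw [hD, PySem.Dict.keys_foldl_modify_key]
    show PySem.Set.update PySem.Dict.empty.keys (R.map L) = _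
    have : (PySem.Dict.empty : PySem.Dict Int (List Int)).keys = [] := rfl
    rw [this, PySem.Set.update_nil_left]
  -- B's list of distinct labels is the same
  have hdistinct :
      (R.foldl
        (fun (p : PySem.Set Int × List Int) i =>
          if PySem.Set.contains p.1 (L i) then p else (PySem.Set.add p.1 (L i), p.2 ++ [L i]))
        (PySem.Set.empty, [])).2
        = PySem.Set.ofList (R.map L) := by
    have h1 : R.foldl
        (fun (p : PySem.Set Int × List Int) i =>
          if PySem.Set.contains p.1 (L i) then p else (PySem.Set.add p.1 (L i), p.2 ++ [L i]))
        (PySem.Set.empty, [])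
        = (R.map L).foldl
          (fun (p : PySem.Set Int × List Int) l =>
            if PySem.Set.contains p.1 l then p else (PySem.Set.add p.1 l, p.2 ++ [l]))
          (PySem.Set.empty, []) := by
      rw [List.foldl_map]
    rw [h1]
    have h2 : (PySem.Set.empty : PySem.Set Int) = ([] : List Int) := rfl
    rw [show ((PySem.Set.empty, []) : PySem.Set Int × List Int)
          = (([] : PySem.Set Int), ([] : List Int)) from rfl]
    rw [pvB_pair_fold (R.map L) []]
    rw [PySem.Set.ofList_eq_foldl]
  rw [hdistinct]
  -- values of the dict = per-key group, and the per-key group is B's rescan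
  have hvals : D.values = D.keys.map (fun k => D.getD k []) :=
    PySem.Dict.values_eq_map_keys D hnodup []
  rw [hvals, hkeys]
  apply List.map_congr_left
  intro lab _
  -- A's group at lab
  have hgetD : D.getD lab []
      = ((R.map (fun i => (L i, V i))).filter (fun p => p.1 == lab)).map (·.2) := by
    have h1 : D = (R.map (fun i => (L i, V i))).foldl
        (fun d p => d.modify p.1 [] (· ++ [p.2])) PySem.Dict.empty := by
      rw [hD, List.foldl_map]
    rw [h1, PySem.Dict.getD_foldl_modify_append]
    simp [PySem.Dict.getD_empty]
  rw [hgetD]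
  -- B's group at lab
  rw [PySem.List.foldl_append_if (fun i => L i == lab) V]
  simp only [List.nil_append]
  rw [List.filter_map]
  simp only [Function.comp_def]
  rw [List.map_map]
  rfl

-- ===== VERDICT (by name: the statement is the Claim_ definition above) =====
theorem clusteringLabelsList_spec : Claim_equal_clusteringLabelsList := by
  intro labels vertex_set _ _
  exact clusteringLabelsList_eq_alt labels vertex_set
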